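-- pv_equiv track=rewrite | github.com/rong-rong-liu/ai-analyst | helpers/pipeline_state.py | _derive_pipeline_status
-- ===== SOURCE A (Python) =====
-- def _derive_pipeline_status(steps: dict) -> str:
--     """Derive overall pipeline status from V1 step statuses.
--
--     - If any step is ``failed`` -> ``failed``
--     - If any step is ``running`` or ``in_progress`` -> ``paused``
--       (was interrupted, so mark as paused for resume)
--     - If all steps are ``complete`` or ``skipped`` -> ``completed``
--     - Otherwise -> ``running``
--     """
--     statuses = {s.get("status", "pending") for s in steps.values()}
--
--     if "failed" in statuses:
--         return "failed"
--     if "running" in statuses or "in_progress" in statuses: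
--         return "paused"
--
--     terminal = {"complete", "skipped", "degraded"}
--     if statuses and statuses <= terminal:
--         return "completed"
--
--     return "running"
-- ===== SOURCE B (Python) =====
-- _RANK = {"failed": 3, "running": 2, "in_progress": 2,
--          "complete": 0, "skipped": 0, "degraded": 0}
-- _RESULT = ["completed", "running", "paused", "failed"]
--
--
-- def _derive_pipeline_status(steps: dict) -> str:
--     worst = max((_RANK.get(s.get("status", "pending"), 1) for s in steps.values()),
--                 default=1)
--     return _RESULT[worst]
-- ===== Notes on version B (the rewrite author's own statement) =====
-- stated objective: alternative
-- what changed: Replaces the set comprehension and priority ladder of membership/subset tests with a max-reduction over a numeric severity rank per step (failed=3, active=2, other=1, terminal=0, empty defaults to 1) followed by a table lookup of the result.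
import Mathlib
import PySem

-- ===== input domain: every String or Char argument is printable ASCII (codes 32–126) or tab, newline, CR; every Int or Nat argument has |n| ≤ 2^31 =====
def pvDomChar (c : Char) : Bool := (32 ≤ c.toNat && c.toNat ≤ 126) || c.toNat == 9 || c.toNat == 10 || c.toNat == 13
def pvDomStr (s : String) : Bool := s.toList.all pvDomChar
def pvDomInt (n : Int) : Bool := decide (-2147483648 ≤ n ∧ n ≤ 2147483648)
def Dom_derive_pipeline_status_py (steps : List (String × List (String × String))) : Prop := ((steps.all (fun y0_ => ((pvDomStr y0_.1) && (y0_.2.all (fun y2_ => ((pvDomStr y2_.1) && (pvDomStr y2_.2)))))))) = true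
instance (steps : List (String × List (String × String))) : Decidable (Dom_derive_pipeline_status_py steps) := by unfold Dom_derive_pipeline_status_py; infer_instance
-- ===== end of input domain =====

-- B replaces A's set comprehension + priority ladder of membership/subset tests with a
-- max-reduction over a numeric severity rank per step and a result-table lookup
-- (alternative algorithm, same cost).
-- ===== PORT A =====
-- s.get("status", "pending") for one step dict s (the same expression occurs in both Pythons)
def pvStat (s : String × List (String × String)) : String :=
  PySem.Dict.getD (PySem.Dict.mk s.2) "status" "pending"

def derive_pipeline_status_py (steps : List (String × List (String × String))) : String :=
  let statuses : PySem.Set String := PySem.Set.ofList (steps.map pvStat)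
  if PySem.Set.contains statuses "failed" then "failed"
  else if PySem.Set.contains statuses "running" || PySem.Set.contains statuses "in_progress" then "paused"
  else
    let terminal : PySem.Set String := PySem.Set.ofList ["complete", "skipped", "degraded"]
    if !statuses.isEmpty && PySem.Set.issubset statuses terminal then "completed"
    else "running"

-- ===== PORT B =====
-- module-level _RANK dict of Source B
def pvRankDict : PySem.Dict String Int :=
  PySem.Dict.mk [("failed", 3), ("running", 2), ("in_progress", 2),
                 ("complete", 0), ("skipped", 0), ("degraded", 0)]

-- _RANK.get(s.get("status", "pending"), 1)
def pvRank (s : String × List (String × String)) : Int :=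
  PySem.Dict.getD pvRankDict (pvStat s) 1

def derive_pipeline_status_py_alt (steps : List (String × List (String × String))) : String :=
  -- max(generator, default=1)
  let worst := (PySem.List.max? (steps.map pvRank) (fun r => r)).getD 1
  -- _RESULT[worst]; worst is always in {0,1,2,3}, so the IndexError branch (.getD) is unreachable
  (PySem.List.pyGet? ["completed", "running", "paused", "failed"] worst).getD "running"

-- ===== PRECONDITION & SPEC =====
def Spec_derive_pipeline_status_py (steps : List (String × List (String × String))) (out : String) : Prop := out = derive_pipeline_status_py_alt steps
instance (steps : List (String × List (String × String))) (out : String) : Decidable (Spec_derive_pipeline_status_py steps out) := by unfold Spec_derive_pipeline_status_py; infer_instance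

-- ===== CLAIM (what is proved, stated in full; the proofs are below) =====
def Claim_equal_derive_pipeline_status_py : Prop := ∀ (steps : List (String × List (String × String))), Dom_derive_pipeline_status_py steps → Spec_derive_pipeline_status_py steps (derive_pipeline_status_py steps)

-- ===== LEMMAS AND PROOFS =====

-- proof-only helpers: pure rank of a status string, and the canonical severity of a status list
def pvRankOf (t : String) : Int :=
  if t == "failed" then 3
  else if t == "running" || t == "in_progress" then 2
  else if t == "complete" || t == "skipped" || t == "degraded" then 0
  else 1

def pvTerm (t : String) : Bool := t == "complete" || t == "skipped" || t == "degraded"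

def pvCanon (L : List String) : Int :=
  if L.contains "failed" then 3
  else if L.contains "running" || L.contains "in_progress" then 2
  else if L.all pvTerm then 0
  else 1

lemma pvRankD (t : String) : PySem.Dict.getD pvRankDict t 1 = pvRankOf t := by
  by_cases h1 : t = "failed"
  · subst h1; rfl
  by_cases h2 : t = "running"
  · subst h2; rfl
  by_cases h3 : t = "in_progress"
  · subst h3; rfl
  by_cases h4 : t = "complete"
  · subst h4; rfl
  by_cases h5 : t = "skipped"
  · subst h5; rfl
  by_cases h6 : t = "degraded"
  · subst h6; rfl
  have e1 : ("failed" == t) = false := beq_eq_false_iff_ne.mpr (Ne.symm h1)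
  have e2 : ("running" == t) = false := beq_eq_false_iff_ne.mpr (Ne.symm h2)
  have e3 : ("in_progress" == t) = false := beq_eq_false_iff_ne.mpr (Ne.symm h3)
  have e4 : ("complete" == t) = false := beq_eq_false_iff_ne.mpr (Ne.symm h4)
  have e5 : ("skipped" == t) = false := beq_eq_false_iff_ne.mpr (Ne.symm h5)
  have e6 : ("degraded" == t) = false := beq_eq_false_iff_ne.mpr (Ne.symm h6)
  simp [pvRankDict, pvRankOf, PySem.Dict.getD, PySem.Dict.get?, List.find?,
    e1, e2, e3, e4, e5, e6, h1, h2, h3, h4, h5, h6]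

lemma pvRank_eq (s : String × List (String × String)) : pvRank s = pvRankOf (pvStat s) :=
  pvRankD (pvStat s)

lemma pvRankOf_nonneg (t : String) : 0 ≤ pvRankOf t := by
  unfold pvRankOf; split_ifs <;> omega

lemma pvCanon_cons (t : String) (L : List String) :
    pvCanon (t :: L) = max (pvRankOf t) (pvCanon L) := by
  unfold pvCanon pvRankOf pvTerm
  simp only [List.contains_cons, List.all_cons, Bool.or_eq_true, beq_iff_eq, Bool.and_eq_true]
  split_ifs <;> simp_all [@eq_comm String t]

lemma pvFoldl_max_canon (M : List String) (r : Int) (hr : 0 ≤ r) :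
    (M.map pvRankOf).foldl max r = max r (pvCanon M) := by
  induction M generalizing r with
  | nil =>
    simp [pvCanon]
    omega
  | cons t M ih =>
    simp only [List.map_cons, List.foldl_cons]
    rw [ih (max r (pvRankOf t)) (le_trans hr (le_max_left _ _)), pvCanon_cons]
    omega

lemma pvOfList_empty {α : Type} [BEq α] [LawfulBEq α] (xs : List α) :
    (PySem.Set.ofList xs).isEmpty = xs.isEmpty := by
  rcases xs with _ | ⟨x, xs⟩
  · rfl
  · have hx : x ∈ PySem.Set.ofList (x :: xs) := (PySem.Set.mem_ofList _ x).mpr (by simp)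
    have hne : PySem.Set.ofList (x :: xs) ≠ [] := by
      intro h; rw [h] at hx; simp at hx
    simp [hne]

-- A's result written over the plain status list
lemma pvA_eq (steps : List (String × List (String × String))) :
    derive_pipeline_status_py steps =
      (if (steps.map pvStat).contains "failed" then "failed"
       else if (steps.map pvStat).contains "running" || (steps.map pvStat).contains "in_progress" then "paused"
       else if !(steps.map pvStat).isEmpty && (steps.map pvStat).all pvTerm then "completed"
       else "running") := by
  unfold derive_pipeline_status_py
  have hmem : ∀ y : String, PySem.Set.contains (PySem.Set.ofList (steps.map pvStat)) y
      = (steps.map pvStat).contains y := by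
    intro y; simp [PySem.Set.contains, PySem.Set.mem_ofList]
  have hsub : PySem.Set.issubset (PySem.Set.ofList (steps.map pvStat))
        (PySem.Set.ofList ["complete", "skipped", "degraded"])
      = (steps.map pvStat).all pvTerm := by
    rw [Bool.eq_iff_iff]
    simp only [PySem.Set.issubset, List.all_eq_true, Bool.or_eq_true, beq_iff_eq,
      PySem.Set.contains, pvTerm]
    constructor
    · intro h t ht
      have := h t ((PySem.Set.mem_ofList _ t).mpr ht)
      simp [PySem.Set.mem_ofList] at this
      tauto
    · intro h t ht
      have := h t ((PySem.Set.mem_ofList _ t).mp ht)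
      simp [PySem.Set.mem_ofList]
      tauto
  simp only [hmem, hsub, pvOfList_empty]

-- combine: A's ladder over a nonempty status list equals B's table lookup at the canonical severity
lemma pvMain (L : List String) (hL : L ≠ []) :
    (if L.contains "failed" then "failed"
     else if L.contains "running" || L.contains "in_progress" then "paused"
     else if !L.isEmpty && L.all pvTerm then "completed"
     else "running")
    = (PySem.List.pyGet? ["completed", "running", "paused", "failed"] (pvCanon L)).getD "running" := by
  have he : L.isEmpty = false := by simpa using hL
  unfold pvCanon
  simp only [he, Bool.not_false, Bool.true_and]
  split_ifs <;> rfl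

-- ===== VERDICT (by name: the statement is the Claim_ definition above) =====
theorem derive_pipeline_status_py_spec : Claim_equal_derive_pipeline_status_py := by
  intro steps _
  unfold Spec_derive_pipeline_status_py
  rw [pvA_eq]
  unfold derive_pipeline_status_py_alt
  cases steps with
  | nil => decide
  | cons x xs =>
    have hmap : (x :: xs).map pvRank = ((x :: xs).map pvStat).map pvRankOf := by
      simp [pvRank_eq, Function.comp]
    rw [hmap]
    simp only [List.map_cons, PySem.List.max?_id_cons, Option.getD_some]
    rw [pvFoldl_max_canon _ _ (pvRankOf_nonneg _), ← pvCanon_cons]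
    exact pvMain (pvStat x :: xs.map pvStat) (by simp)
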